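-- pv_equiv track=rewrite | github.com/Nik2630/STT-A3 | lab9/analyze_deps.py | calculate_fan_metrics
-- ===== SOURCE A (Python) =====
-- from collections import defaultdict
--
-- def calculate_fan_metrics(dep_data, graph, all_nodes):
--
--     fan_in = defaultdict(int)
--     fan_out = defaultdict(int)
--
--     # Calculate Fan-Out based on the graph (imports within the analyzed scope)
--     for module_name, imports in graph.items():
--         fan_out[module_name] = len(imports)
--
--     # Calculate Fan-In by checking who imports whom
--     for source_module, imported_modules in graph.items():
--         for imported_module in imported_modules:
--              # Check if imported_module is part of the analysis
--              if imported_module in all_nodes: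
--                 fan_in[imported_module] += 1
--
--     # Ensure all modules have an entry, even if 0
--     metrics = {}
--     for node in all_nodes:
--         metrics[node] = {
--             'fan_in': fan_in.get(node, 0),
--             'fan_out': fan_out.get(node, 0)
--         }
--     return metrics
-- ===== SOURCE B (Python) =====
-- def calculate_fan_metrics(dep_data, graph, all_nodes):
--     metrics = {}
--     for node in all_nodes:
--         metrics[node] = {
--             'fan_in': sum(imports.count(node) for imports in graph.values()),
--             'fan_out': len(graph.get(node, [])),
--         }
--     return metrics
-- ===== Notes on version B (the rewrite author's own statement) =====
-- stated objective: simpler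
-- what changed: Replaces the two defaultdict accumulation passes over the graph's edges with a single pass over all_nodes that computes each node's fan_in by counting its occurrences in graph.values() and fan_out via graph.get(node, []).
import Mathlib
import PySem

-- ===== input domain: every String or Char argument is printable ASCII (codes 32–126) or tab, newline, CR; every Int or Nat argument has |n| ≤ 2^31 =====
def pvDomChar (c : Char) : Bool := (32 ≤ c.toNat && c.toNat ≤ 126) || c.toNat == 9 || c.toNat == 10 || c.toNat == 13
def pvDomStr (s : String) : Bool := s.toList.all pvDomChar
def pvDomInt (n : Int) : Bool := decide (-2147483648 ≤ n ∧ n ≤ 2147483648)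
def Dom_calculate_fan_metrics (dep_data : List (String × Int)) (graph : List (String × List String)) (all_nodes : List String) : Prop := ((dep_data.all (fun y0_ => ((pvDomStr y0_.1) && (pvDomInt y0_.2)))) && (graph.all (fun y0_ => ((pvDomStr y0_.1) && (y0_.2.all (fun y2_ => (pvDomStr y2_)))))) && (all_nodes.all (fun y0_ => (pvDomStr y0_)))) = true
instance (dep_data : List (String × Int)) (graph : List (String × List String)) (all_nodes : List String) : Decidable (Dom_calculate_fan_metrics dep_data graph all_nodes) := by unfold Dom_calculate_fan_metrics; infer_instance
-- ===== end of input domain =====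

-- B replaces A's two edge-wise defaultdict accumulation passes by one pass over all_nodes that
-- counts each node's occurrences in graph.values() (fan_in) and reads graph.get(node, []) (fan_out);
-- objective: simpler.
-- ===== PORT A =====
def calculate_fan_metrics (dep_data : List (String × Int)) (graph : List (String × List String)) (all_nodes : List String) : List (String × List (String × Int)) :=
  let g := PySem.Dict.ofList graph
  let fan_out := g.items.foldl (fun d p => d.insert p.1 (p.2.length : Int)) PySem.Dict.empty
  let fan_in := g.items.foldl (fun d p =>
      p.2.foldl (fun d m => if all_nodes.contains m then d.modify m 0 (· + 1) else d) d)
    PySem.Dict.empty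
  let metrics := all_nodes.foldl (fun m node =>
      m.insert node [("fan_in", fan_in.getD node 0), ("fan_out", fan_out.getD node 0)])
    (PySem.Dict.empty : PySem.Dict String (List (String × Int)))
  metrics.items

-- ===== PORT B =====
def calculate_fan_metrics_alt (dep_data : List (String × Int)) (graph : List (String × List String)) (all_nodes : List String) : List (String × List (String × Int)) :=
  let g := PySem.Dict.ofList graph
  (all_nodes.foldl (fun m node =>
      m.insert node
        [("fan_in", (g.values.map (fun imports => (imports.count node : Int))).sum),
         ("fan_out", ((g.getD node []).length : Int))])
    (PySem.Dict.empty : PySem.Dict String (List (String × Int)))).items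

-- ===== PRECONDITION & SPEC =====
def Spec_calculate_fan_metrics (dep_data : List (String × Int)) (graph : List (String × List String)) (all_nodes : List String) (out : List (String × List (String × Int))) : Prop := out = calculate_fan_metrics_alt dep_data graph all_nodes
instance (dep_data : List (String × Int)) (graph : List (String × List String)) (all_nodes : List String) (out : List (String × List (String × Int))) : Decidable (Spec_calculate_fan_metrics dep_data graph all_nodes out) := by unfold Spec_calculate_fan_metrics; infer_instance

-- ===== CLAIM (what is proved, stated in full; the proofs are below) =====
def Claim_equal_calculate_fan_metrics : Prop := ∀ (dep_data : List (String × Int)) (graph : List (String × List String)) (all_nodes : List String), Dom_calculate_fan_metrics dep_data graph all_nodes → Spec_calculate_fan_metrics dep_data graph all_nodes (calculate_fan_metrics dep_data graph all_nodes)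

-- ===== LEMMAS AND PROOFS =====

lemma fanin_getD (ps : List (String × List String)) (P : String → Bool)
    (d : PySem.Dict String Int) (node : String) :
    (ps.foldl (fun d p => (p.2.filter P).foldl (fun d m => d.modify m 0 (· + 1)) d) d).getD node 0
      = d.getD node 0 + (ps.map (fun p => ((p.2.filter P).count node : Int))).sum := by
  induction ps generalizing d with
  | nil => simp
  | cons p t ih =>
      simp only [List.foldl_cons, List.map_cons, List.sum_cons, ih,
        PySem.Dict.getD_foldl_modify_add_one]
      ring

lemma get?_mk_eq_none_of_not_mem (ps : List (String × List String)) (k : String)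
    (hk : k ∉ ps.map (·.1)) : (PySem.Dict.mk ps).get? k = none := by
  induction ps with
  | nil => rfl
  | cons q t ih =>
      obtain ⟨a, b⟩ := q
      simp only [List.map_cons, List.mem_cons, not_or] at hk
      rw [PySem.Dict.get?_mk_cons]
      have hne : (a == k) = false := by simp [Ne.symm hk.1]
      simp only [hne]
      exact ih hk.2

lemma fanout_get? (ps : List (String × List String)) (d0 : PySem.Dict String Int)
    (node : String) (hnd : (ps.map (·.1)).Nodup) :
    (ps.foldl (fun d p => d.insert p.1 (p.2.length : Int)) d0).get? node
      = match (PySem.Dict.mk ps).get? node with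
        | some v => some ((v.length : Int))
        | none => d0.get? node := by
  induction ps generalizing d0 with
  | nil => rfl
  | cons p t ih =>
      obtain ⟨a, b⟩ := p
      simp only [List.map_cons, List.nodup_cons] at hnd
      simp only [List.foldl_cons, ih _ hnd.2, PySem.Dict.get?_mk_cons]
      by_cases h : a = node
      · subst h
        have hn : (PySem.Dict.mk t).get? a = none := get?_mk_eq_none_of_not_mem t a hnd.1
        simp [hn, PySem.Dict.get?_insert_self]
      · have hne : (a == node) = false := by simp [h]
        simp only [hne]
        cases hm : (PySem.Dict.mk t).get? node with
        | some v => rfl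
        | none => simp [PySem.Dict.get?_insert_of_ne _ _ (Ne.symm h)]

lemma value_eq (graph : List (String × List String)) (all_nodes : List String)
    (node : String) (hmem : node ∈ all_nodes) :
    ([("fan_in",
        ((PySem.Dict.ofList graph).items.foldl (fun d p =>
            p.2.foldl (fun d m => if all_nodes.contains m then d.modify m 0 (· + 1) else d) d)
          PySem.Dict.empty).getD node 0),
      ("fan_out",
        ((PySem.Dict.ofList graph).items.foldl (fun d p => d.insert p.1 (p.2.length : Int))
            PySem.Dict.empty).getD node 0)] : List (String × Int))
    = [("fan_in",
          ((PySem.Dict.ofList graph).values.map (fun imports => (imports.count node : Int))).sum),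
       ("fan_out", (((PySem.Dict.ofList graph).getD node []).length : Int))] := by
  have h1 :
      ((PySem.Dict.ofList graph).items.foldl (fun d p =>
          p.2.foldl (fun d m => if all_nodes.contains m then d.modify m 0 (· + 1) else d) d)
        PySem.Dict.empty).getD node 0
      = ((PySem.Dict.ofList graph).values.map (fun imports => (imports.count node : Int))).sum := by
    have hf := fanin_getD (PySem.Dict.ofList graph).items (fun m => all_nodes.contains m)
      PySem.Dict.empty node
    simp only [List.foldl_filter] at hf
    rw [hf]
    have hz : (PySem.Dict.empty : PySem.Dict String Int).getD node 0 = 0 := rfl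
    rw [hz, zero_add]
    have hv : (PySem.Dict.ofList graph).values = (PySem.Dict.ofList graph).items.map (·.2) := rfl
    rw [hv, List.map_map]
    congr 1
    apply List.map_congr_left
    intro p _
    have : List.count node (p.2.filter (fun m => all_nodes.contains m)) = List.count node p.2 :=
      List.count_filter (by simpa using hmem)
    simp only [Function.comp, this]
  have h2 :
      ((PySem.Dict.ofList graph).items.foldl (fun d p => d.insert p.1 (p.2.length : Int))
          PySem.Dict.empty).getD node 0
      = (((PySem.Dict.ofList graph).getD node []).length : Int) := by
    have hnd : ((PySem.Dict.ofList graph).items.map (·.1)).Nodup :=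
      PySem.Dict.nodup_keys_ofList graph
    have h := fanout_get? (PySem.Dict.ofList graph).items PySem.Dict.empty node hnd
    have hmk : (PySem.Dict.mk (PySem.Dict.ofList graph).items) = PySem.Dict.ofList graph := rfl
    rw [hmk] at h
    have hgd : ((PySem.Dict.ofList graph).items.foldl
        (fun d p => d.insert p.1 (p.2.length : Int)) PySem.Dict.empty).getD node 0
      = (((PySem.Dict.ofList graph).items.foldl
          (fun d p => d.insert p.1 (p.2.length : Int)) PySem.Dict.empty).get? node).getD 0 := rfl
    have hgd2 : (PySem.Dict.ofList graph).getD node []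
      = ((PySem.Dict.ofList graph).get? node).getD [] := rfl
    rw [hgd, h, hgd2]
    cases (PySem.Dict.ofList graph).get? node with
    | some v => rfl
    | none => rfl
  rw [h1, h2]

-- ===== VERDICT (by name: the statement is the Claim_ definition above) =====
theorem calculate_fan_metrics_spec : Claim_equal_calculate_fan_metrics := by
  intro dep_data graph all_nodes _
  unfold Spec_calculate_fan_metrics calculate_fan_metrics calculate_fan_metrics_alt
  dsimp only
  congr 1
  apply PySem.List.foldl_congr_mem
  intro acc node hmem
  rw [value_eq graph all_nodes node hmem]
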